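-- pv_equiv track=rewrite | github.com/PedroPinto27/PL2025-A104176 | TPC2/tpc2.py | listaPorPeriodo
-- ===== SOURCE A (Python) =====
-- def listaPorPeriodo(dados):
--
--     dict={}
--
--     periodo = dados[0].index("periodo")
--     nome = dados[0].index("nome")
--
--     for linha in dados[1:]:
--         key = linha[periodo]
--         if key in dict:
--             dict[key].append(linha[nome])
--         else:
--             dict[key] = [linha[nome]]
--
--     for key in dict:
--         dict[key] = sorted(dict[key])
--
--     return dict
-- ===== SOURCE B (Python) =====
-- def listaPorPeriodo(dados):
--     periodo = dados[0].index("periodo")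
--     nome = dados[0].index("nome")
--     linhas = dados[1:]
--
--     chaves = []
--     for linha in linhas:
--         if linha[periodo] not in chaves:
--             chaves.append(linha[periodo])
--
--     return {k: sorted(linha[nome] for linha in linhas if linha[periodo] == k)
--             for k in chaves}
-- ===== Notes on version B (the rewrite author's own statement) =====
-- stated objective: alternative
-- what changed: B first collects the distinct periods in first-appearance order, then builds the whole result in one dict comprehension that filters and sorts the names per period, instead of A's incremental dict mutation followed by a second in-place per-key sorting loop.
import Mathlib
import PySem

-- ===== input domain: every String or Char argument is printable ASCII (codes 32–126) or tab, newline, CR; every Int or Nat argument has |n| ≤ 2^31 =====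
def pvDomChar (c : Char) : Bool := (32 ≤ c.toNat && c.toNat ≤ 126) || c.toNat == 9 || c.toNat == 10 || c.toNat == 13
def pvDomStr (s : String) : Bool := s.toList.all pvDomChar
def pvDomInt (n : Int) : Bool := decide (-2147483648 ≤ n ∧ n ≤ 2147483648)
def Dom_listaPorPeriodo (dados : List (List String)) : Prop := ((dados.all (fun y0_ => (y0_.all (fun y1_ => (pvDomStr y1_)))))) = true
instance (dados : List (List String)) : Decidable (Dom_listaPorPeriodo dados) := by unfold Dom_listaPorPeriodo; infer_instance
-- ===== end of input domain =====

-- B replaces A's incremental dict build + second per-key sorting loop by a distinct-key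
-- collection followed by one map that filters and sorts the names per period (alternative
-- decomposition, same cost class).


-- ===== PORT A =====
def listaPorPeriodo (dados : List (List String)) : List (String × List String) :=
  let header : List String := (PySem.List.pyGet? dados 0).getD []
  let periodo : Nat := (PySem.List.index? header "periodo").getD 0
  let nome : Nat := (PySem.List.index? header "nome").getD 0
  -- first loop: build the dict row by row
  let d : PySem.Dict String (List String) :=
    (PySem.List.slice dados (some 1)).foldl
      (fun d linha =>
        let key := (PySem.List.pyGet? linha (periodo : Int)).getD ""
        let nm := (PySem.List.pyGet? linha (nome : Int)).getD ""
        if d.contains key then d.modify key [] (fun v => v ++ [nm])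
        else d.insert key [nm])
      PySem.Dict.empty
  -- second loop: dict[key] = sorted(dict[key]) for each key
  let d2 := d.keys.foldl (fun d key => d.modify key [] (fun v => PySem.List.sorted v (fun x => x))) d
  d2.items

-- ===== PORT B =====
def listaPorPeriodo_alt (dados : List (List String)) : List (String × List String) :=
  let header : List String := (PySem.List.pyGet? dados 0).getD []
  let periodo : Nat := (PySem.List.index? header "periodo").getD 0
  let nome : Nat := (PySem.List.index? header "nome").getD 0
  let linhas := PySem.List.slice dados (some 1)
  -- distinct periods in first-appearance order
  let chaves : PySem.Set String :=
    linhas.foldl (fun ks linha => PySem.Set.add ks ((PySem.List.pyGet? linha (periodo : Int)).getD "")) PySem.Set.empty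
  -- dict comprehension: for each period, the sorted names of its rows
  chaves.map (fun k =>
    (k, PySem.List.sorted
          ((linhas.filter (fun linha => (PySem.List.pyGet? linha (periodo : Int)).getD "" == k)).map
            (fun linha => (PySem.List.pyGet? linha (nome : Int)).getD ""))
          (fun x => x)))

-- ===== PRECONDITION & SPEC =====
-- Pre_: exactly where the Python A returns normally — dados nonempty (dados[0]), header contains
-- "periodo" and "nome" (.index), and every data row is long enough for both column indices.
def Pre_listaPorPeriodo (dados : List (List String)) : Prop :=
  dados ≠ [] ∧ "periodo" ∈ dados.headD [] ∧ "nome" ∈ dados.headD [] ∧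
  ∀ l ∈ dados.tail,
    (dados.headD []).idxOf "periodo" < l.length ∧ (dados.headD []).idxOf "nome" < l.length
instance (dados : List (List String)) : Decidable (Pre_listaPorPeriodo dados) := by unfold Pre_listaPorPeriodo; infer_instance

def pvWitness_listaPorPeriodo : List (List String) :=
  [["nome", "periodo"], ["Rui", "2"], ["Ana", "1"], ["Bia", "2"]]

def Spec_listaPorPeriodo (dados : List (List String)) (out : List (String × List String)) : Prop := out = listaPorPeriodo_alt dados
instance (dados : List (List String)) (out : List (String × List String)) : Decidable (Spec_listaPorPeriodo dados out) := by unfold Spec_listaPorPeriodo; infer_instance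

-- ===== CLAIM (what is proved, stated in full; the proofs are below) =====
def Claim_equal_listaPorPeriodo : Prop := ∀ (dados : List (List String)), Dom_listaPorPeriodo dados → Pre_listaPorPeriodo dados → Spec_listaPorPeriodo dados (listaPorPeriodo dados)

-- ===== LEMMAS AND PROOFS =====

-- A's second loop leaves the key list unchanged when it runs over keys already present.
theorem sortLoop_keys (ks : List String) (d : PySem.Dict String (List String))
    (h : ∀ k ∈ ks, k ∈ d.keys) :
    (ks.foldl (fun d key => d.modify key [] (fun v => PySem.List.sorted v (fun x => x))) d).keys = d.keys := by
  induction ks generalizing d with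
  | nil => rfl
  | cons k ks ih =>
      have hk : d.contains k = true := (PySem.Dict.contains_iff_mem_keys d k).mpr (h k (by simp))
      have hkeys : (d.modify k [] (fun v => PySem.List.sorted v (fun x => x))).keys = d.keys := by
        rw [PySem.Dict.keys_modify, PySem.Dict.keys_insert_of_contains _ _ hk]
      simp only [List.foldl_cons]
      rw [ih _ (by intro x hx; rw [hkeys]; exact h x (by simp [hx]))]
      exact hkeys

-- A's second loop sorts the value at each key it visits (once — the keys are distinct).
theorem sortLoop_getD (ks : List String) (d : PySem.Dict String (List String))
    (hnd : ks.Nodup) (c : String) :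
    (ks.foldl (fun d key => d.modify key [] (fun v => PySem.List.sorted v (fun x => x))) d).getD c []
      = if c ∈ ks then PySem.List.sorted (d.getD c []) (fun x => x) else d.getD c [] := by
  induction ks generalizing d with
  | nil => simp
  | cons k ks ih =>
      simp only [List.foldl_cons]
      rcases List.nodup_cons.mp hnd with ⟨hk, hnd'⟩
      by_cases hc : c = k
      · subst hc
        rw [ih _ hnd', if_neg hk, PySem.Dict.getD_modify, if_pos rfl, if_pos (by simp)]
      · rw [ih _ hnd', PySem.Dict.getD_modify, if_neg hc]
        by_cases hm : c ∈ ks <;> simp [hm, hc]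

-- ===== VERDICT (by name: the statement is the Claim_ definition above) =====
theorem listaPorPeriodo_spec : Claim_equal_listaPorPeriodo := by
  intro dados _ _
  unfold Spec_listaPorPeriodo listaPorPeriodo listaPorPeriodo_alt
  simp only []
  set header : List String := (PySem.List.pyGet? dados 0).getD [] with hheader
  set periodo : Nat := (PySem.List.index? header "periodo").getD 0 with hperiodo
  set nome : Nat := (PySem.List.index? header "nome").getD 0 with hnome
  set linhas := PySem.List.slice dados (some 1) with hlinhas
  set kf : List String → String := fun l => (PySem.List.pyGet? l (periodo : Int)).getD "" with hkf
  set nf : List String → String := fun l => (PySem.List.pyGet? l (nome : Int)).getD "" with hnf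
  -- the first loop's if/else is exactly Dict.modify
  have hstep : (fun (d : PySem.Dict String (List String)) (linha : List String) =>
        if d.contains (kf linha) then d.modify (kf linha) [] (fun v => v ++ [nf linha])
        else d.insert (kf linha) [nf linha])
      = (fun d linha => d.modify (kf linha) [] (fun v => v ++ [nf linha])) := by
    funext d linha
    by_cases h : d.contains (kf linha) = true
    · simp [h]
    · have h' : d.contains (kf linha) = false := by simpa using h
      have hm : d.modify (kf linha) [] (fun v => v ++ [nf linha])
          = d.insert (kf linha) (d.getD (kf linha) [] ++ [nf linha]) := rfl
      rw [if_neg h, hm, PySem.Dict.getD_of_not_contains _ _ h']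
      rfl
  rw [hstep]
  set d1 := linhas.foldl (fun d linha => d.modify (kf linha) [] (fun v => v ++ [nf linha]))
      (PySem.Dict.empty : PySem.Dict String (List String)) with hd1
  -- keys of d1: distinct periods in first-appearance order
  have hkeys1 : d1.keys = PySem.Set.ofList (linhas.map kf) := by
    rw [hd1, PySem.Dict.keys_foldl_modify_key linhas kf [] (fun _ l v => v ++ [nf l])]
    rfl
  have hnd1 : d1.keys.Nodup := by
    rw [hd1]
    exact PySem.Dict.nodup_keys_foldl_modify_key linhas kf [] (fun _ l v => v ++ [nf l]) _ (by simp)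
  -- values of d1: the names of the rows with that period, in row order
  have hgetD1 : ∀ c, d1.getD c [] = (linhas.filter (fun l => kf l == c)).map nf := by
    intro c
    have : d1 = ((linhas.map (fun l => (kf l, nf l))).foldl
        (fun d p => d.modify p.1 [] (fun v => v ++ [p.2])) PySem.Dict.empty) := by
      rw [hd1, List.foldl_map]
    rw [this, PySem.Dict.getD_foldl_modify_append, PySem.Dict.getD_empty, List.nil_append,
      List.filter_map, List.map_map]
    rfl
  set d2 := d1.keys.foldl (fun d key => d.modify key [] (fun v => PySem.List.sorted v (fun x => x))) d1 with hd2
  have hkeys2 : d2.keys = d1.keys := sortLoop_keys d1.keys d1 (fun _ hk => hk)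
  have hnd2 : d2.keys.Nodup := hkeys2 ▸ hnd1
  rw [PySem.Dict.items_eq_map_keys d2 hnd2 [], hkeys2]
  -- B's key-collection loop is Set.ofList of the mapped periods
  have hchaves : linhas.foldl (fun ks linha => PySem.Set.add ks (kf linha)) PySem.Set.empty
      = PySem.Set.ofList (linhas.map kf) := by
    rw [PySem.Set.ofList_eq_foldl, List.foldl_map]; rfl
  rw [hchaves, ← hkeys1]
  refine List.map_congr_left ?_
  intro k hk
  rw [hd2, sortLoop_getD d1.keys d1 hnd1 k, if_pos hk, hgetD1 k]
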